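-- pv_equiv track=rewrite | github.com/debashishc/advent-of-code | 2020/05/day5.py | recurse
-- ===== SOURCE A (Python) =====
-- def recurse(_chars, _list):
--     list_len = len(_list)
--     if not _chars:
--         return _list[0]
--     elif _chars[0] in ("F", "L"): # lower-half
--         return recurse(_chars[1:], _list[0:list_len//2])
--     else:
--         return recurse(_chars[1:], _list[list_len//2:])
-- ===== SOURCE B (Python) =====
-- def recurse(_chars, _list):
--     lo, hi = 0, len(_list)
--     for c in _chars:
--         mid = (lo + hi) // 2
--         if c in ("F", "L"):
--             hi = mid
--         else:
--             lo = mid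
--     return _list[lo]
-- ===== Notes on version B (the rewrite author's own statement) =====
-- stated objective: faster
-- what changed: Replaces the recursion that repeatedly copies half of the list by slicing with a single iterative two-pointer pass over the characters that narrows an index interval [lo,hi) and indexes the original list once.
import Mathlib
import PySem

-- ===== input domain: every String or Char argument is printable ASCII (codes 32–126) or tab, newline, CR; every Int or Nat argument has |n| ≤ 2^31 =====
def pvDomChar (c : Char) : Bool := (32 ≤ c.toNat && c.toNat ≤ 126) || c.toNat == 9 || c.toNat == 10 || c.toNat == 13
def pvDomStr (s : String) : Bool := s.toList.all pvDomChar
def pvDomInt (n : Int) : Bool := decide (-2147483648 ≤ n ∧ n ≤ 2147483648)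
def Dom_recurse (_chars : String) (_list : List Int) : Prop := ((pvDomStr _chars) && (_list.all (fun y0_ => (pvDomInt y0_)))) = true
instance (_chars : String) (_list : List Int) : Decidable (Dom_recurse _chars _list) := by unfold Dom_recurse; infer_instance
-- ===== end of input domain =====

-- B replaces A's slice-copying recursion by an iterative two-pointer pass over the
-- characters that narrows an index interval and indexes the original list once.


-- ===== PORT A =====
-- literal transliteration of A's recursion; _list[0] on an empty list is an
-- IndexError in Python, modelled by pyGet? = none (excluded by Pre_, getD 0 is junk)
def recurseAux : List Char → List Int → Int
  | [], l => (PySem.List.pyGet? l 0).getD 0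
  | c :: rest, l =>
    let listLen : Int := l.length
    if c = 'F' ∨ c = 'L' then
      recurseAux rest (PySem.List.slice l (some 0) (some (PySem.Int.floordiv listLen 2)))
    else
      recurseAux rest (PySem.List.slice l (some (PySem.Int.floordiv listLen 2)) none)

def recurse (_chars : String) (_list : List Int) : Int :=
  recurseAux _chars.toList _list

-- ===== PORT B =====
-- one step of B's loop: narrow [lo,hi) by the midpoint
def pvStep (p : Int × Int) (c : Char) : Int × Int :=
  let mid := PySem.Int.floordiv (p.1 + p.2) 2
  if c = 'F' ∨ c = 'L' then (p.1, mid) else (mid, p.2)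

def recurse_alt (_chars : String) (_list : List Int) : Int :=
  let p := _chars.toList.foldl pvStep (0, (_list.length : Int))
  (PySem.List.pyGet? _list p.1).getD 0

-- ===== PRECONDITION & SPEC =====
-- value of the characters read as a binary number, first char = least significant bit,
-- F/L = 0, anything else = 1
def pvUpperVal : List Char → Int
  | [] => 0
  | c :: rest => (if c = 'F' ∨ c = 'L' then 0 else 1) + 2 * pvUpperVal rest

-- A raises IndexError exactly when the selected segment becomes empty, i.e. when
-- len(_list) + pvUpperVal(_chars) < 2^len(_chars); Pre_ excludes exactly those inputs.
def Pre_recurse (_chars : String) (_list : List Int) : Prop :=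
  2 ^ _chars.toList.length ≤ (_list.length : Int) + pvUpperVal _chars.toList
instance (_chars : String) (_list : List Int) : Decidable (Pre_recurse _chars _list) := by
  unfold Pre_recurse; infer_instance

def pvWitness_recurse : String × List Int := ("FB", [1, 2, 3, 4])

def Spec_recurse (_chars : String) (_list : List Int) (out : Int) : Prop := out = recurse_alt _chars _list
instance (_chars : String) (_list : List Int) (out : Int) : Decidable (Spec_recurse _chars _list out) := by unfold Spec_recurse; infer_instance

-- ===== CLAIM (what is proved, stated in full; the proofs are below) =====
def Claim_equal_recurse : Prop := ∀ (_chars : String) (_list : List Int), Dom_recurse _chars _list → Pre_recurse _chars _list → Spec_recurse _chars _list (recurse _chars _list)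

-- ===== LEMMAS AND PROOFS =====

-- the width hi - lo of B's interval after the fold is ⌊(hi - lo + u)/2^m⌋
theorem pvStep_width (cs : List Char) : ∀ (lo hi : Int), lo ≤ hi →
    (cs.foldl pvStep (lo, hi)).2 - (cs.foldl pvStep (lo, hi)).1
      = (hi - lo + pvUpperVal cs) / 2 ^ cs.length := by
  induction cs with
  | nil => intro lo hi _; simp [pvUpperVal]
  | cons c rest ih =>
    intro lo hi hlh
    simp only [List.foldl_cons, pvStep, pvUpperVal, List.length_cons]
    rw [PySem.Int.floordiv_eq_ediv_of_pos (by norm_num)]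
    have h2 : lo ≤ (lo + hi) / 2 ∧ (lo + hi) / 2 ≤ hi := by omega
    by_cases hc : c = 'F' ∨ c = 'L'
    · simp only [hc, if_pos]
      rw [ih lo ((lo + hi) / 2) h2.1]
      have hx : (lo + hi) / 2 - lo + pvUpperVal rest
          = (hi - lo + ((if c = 'F' ∨ c = 'L' then (0:Int) else 1) + 2 * pvUpperVal rest)) / 2 := by
        simp only [hc, if_true]; omega
      rw [hx, Int.ediv_ediv_of_nonneg (by norm_num), if_pos hc]
      ring_nf
    · simp only [hc, if_false]
      rw [ih ((lo + hi) / 2) hi h2.2]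
      have hx : hi - (lo + hi) / 2 + pvUpperVal rest
          = (hi - lo + ((if c = 'F' ∨ c = 'L' then (0:Int) else 1) + 2 * pvUpperVal rest)) / 2 := by
        simp only [hc, if_false]; omega
      rw [hx, Int.ediv_ediv_of_nonneg (by norm_num), if_neg hc]
      ring_nf

-- B's pointers stay ordered and inside the original bounds
theorem pvStep_bounds (cs : List Char) : ∀ (lo hi : Int), lo ≤ hi →
    lo ≤ (cs.foldl pvStep (lo, hi)).1 ∧ (cs.foldl pvStep (lo, hi)).1 ≤ (cs.foldl pvStep (lo, hi)).2
      ∧ (cs.foldl pvStep (lo, hi)).2 ≤ hi := by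
  induction cs with
  | nil =>
    intro lo hi h
    simp only [List.foldl_nil]
    exact ⟨le_refl _, h, le_refl _⟩
  | cons c rest ih =>
    intro lo hi hlh
    simp only [List.foldl_cons, pvStep]
    rw [PySem.Int.floordiv_eq_ediv_of_pos (by norm_num)]
    have h2 : lo ≤ (lo + hi) / 2 ∧ (lo + hi) / 2 ≤ hi := by omega
    by_cases hc : c = 'F' ∨ c = 'L'
    · simp only [hc, if_true]
      have := ih lo ((lo + hi) / 2) h2.1
      exact ⟨this.1, this.2.1, this.2.2.trans h2.2⟩
    · simp only [hc, if_false]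
      have := ih ((lo + hi) / 2) hi h2.2
      exact ⟨h2.1.trans this.1, this.2.1, this.2.2⟩

-- main invariant: A on the segment _list[lo:hi] equals the original list indexed at
-- B's final lo pointer, provided the final interval is nonempty
theorem pv_main (cs : List Char) : ∀ (l : List Int) (lo hi : Int),
    0 ≤ lo → lo ≤ hi → hi ≤ (l.length : Int) →
    (cs.foldl pvStep (lo, hi)).1 < (cs.foldl pvStep (lo, hi)).2 →
    recurseAux cs ((l.drop lo.toNat).take (hi.toNat - lo.toNat))
      = (PySem.List.pyGet? l (cs.foldl pvStep (lo, hi)).1).getD 0 := by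
  induction cs with
  | nil =>
    intro l lo hi h0 hlh hhl hlt
    simp only [List.foldl_nil] at hlt ⊢
    have hlo : lo.toNat < l.length := by omega
    simp only [recurseAux, PySem.List.pyGet?_zero, PySem.List.pyGet?_of_nonneg _ h0]
    rw [List.getElem?_take_of_lt (by omega), List.getElem?_drop, Nat.add_zero]
  | cons c rest ih =>
    intro l lo hi h0 hlh hhl hlt
    simp only [List.foldl_cons, pvStep] at hlt ⊢
    rw [PySem.Int.floordiv_eq_ediv_of_pos (by norm_num)] at hlt ⊢
    have hseglen : ((l.drop lo.toNat).take (hi.toNat - lo.toNat)).length = hi.toNat - lo.toNat := by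
      simp [List.length_take, List.length_drop]; omega
    simp only [recurseAux, hseglen]
    by_cases hc : c = 'F' ∨ c = 'L'
    · simp only [hc, if_true] at hlt ⊢
      -- lower half: _list[lo:hi][0 : (hi-lo)//2] = _list[lo : (lo+hi)//2]
      have hmid := And.intro (show lo ≤ (lo + hi) / 2 by omega) (show (lo + hi) / 2 ≤ hi by omega)
      have hslice : PySem.List.slice ((l.drop lo.toNat).take (hi.toNat - lo.toNat))
            (some 0) (some (PySem.Int.floordiv ((hi.toNat - lo.toNat : Nat) : Int) 2))
          = (l.drop lo.toNat).take (((lo + hi) / 2).toNat - lo.toNat) := by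
        rw [PySem.Int.floordiv_eq_ediv_of_pos (by norm_num)]
        rw [PySem.List.slice_zero_start, PySem.List.slice_to _ (by positivity)]
        rw [List.take_take]
        congr 1
        omega
      rw [hslice, ih l lo ((lo + hi) / 2) h0 hmid.1 (by omega) hlt]
    · simp only [hc, if_false] at hlt ⊢
      -- upper half: _list[lo:hi][(hi-lo)//2 :] = _list[(lo+hi)//2 : hi]
      have hmid := And.intro (show lo ≤ (lo + hi) / 2 by omega) (show (lo + hi) / 2 ≤ hi by omega)
      have hslice : PySem.List.slice ((l.drop lo.toNat).take (hi.toNat - lo.toNat))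
            (some (PySem.Int.floordiv ((hi.toNat - lo.toNat : Nat) : Int) 2)) none
          = (l.drop ((lo + hi) / 2).toNat).take (hi.toNat - ((lo + hi) / 2).toNat) := by
        rw [PySem.Int.floordiv_eq_ediv_of_pos (by norm_num)]
        have e1 : (((hi.toNat - lo.toNat : Nat) : Int) / 2).toNat
            = ((lo + hi) / 2).toNat - lo.toNat := by omega
        rw [PySem.List.slice_from _ (by positivity), e1, List.drop_take, List.drop_drop]
        have e2 : lo.toNat + (((lo + hi) / 2).toNat - lo.toNat) = ((lo + hi) / 2).toNat := by omega
        have e3 : hi.toNat - lo.toNat - (((lo + hi) / 2).toNat - lo.toNat)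
            = hi.toNat - ((lo + hi) / 2).toNat := by omega
        rw [e2, e3]
      have hnn : (0:Int) ≤ (lo + hi) / 2 := by omega
      rw [hslice, ih l ((lo + hi) / 2) hi hnn hmid.2 hhl hlt]

-- ===== VERDICT (by name: the statement is the Claim_ definition above) =====
theorem recurse_spec : Claim_equal_recurse := by
  intro _chars _list _hdom hpre
  unfold Spec_recurse recurse recurse_alt
  have hlh : (0:Int) ≤ (_list.length : Int) := by positivity
  have hw := pvStep_width _chars.toList 0 (_list.length : Int) hlh
  have hb := pvStep_bounds _chars.toList 0 (_list.length : Int) hlh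
  unfold Pre_recurse at hpre
  have hlt : (_chars.toList.foldl pvStep (0, (_list.length : Int))).1
      < (_chars.toList.foldl pvStep (0, (_list.length : Int))).2 := by
    have hpos : (0:Int) < 2 ^ _chars.toList.length := by positivity
    have h1 : (1:Int) ≤ ((_list.length : Int) - 0 + pvUpperVal _chars.toList) / 2 ^ _chars.toList.length := by
      rw [Int.le_ediv_iff_mul_le hpos]
      omega
    omega
  have := pv_main _chars.toList _list 0 (_list.length : Int) le_rfl hlh le_rfl hlt
  simpa using this
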